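-- pv_equiv track=rewrite | github.com/JaeIn1/Algorithm | 프로그래머스/2/389479. 서버 증설 횟수/서버 증설 횟수.py | solution
-- ===== SOURCE A (Python) =====
-- def solution(players, m, k):
--     answer = 0
--     size = len(players)
--     servers = [0] * size
--
--     def server_expansion(need_server, start):
--         for idx in range(k):
--             if start + idx < size:
--                 servers[start + idx] += need_server
--
--     for idx, player in enumerate(players):
--         if player >= m:
--             need_server = (player // m) - servers[idx]
--             if need_server > 0:
--                 server_expansion(need_server, idx)
--                 answer += need_server
--
--     return answer
-- ===== SOURCE B (Python) =====
-- def solution(players, m, k):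
--     # Sliding-window re-implementation: `active` tracks the servers currently
--     # running (sum of the needs added in the last k steps), maintained
--     # incrementally instead of re-writing a range of the servers array.
--     n = len(players)
--     needs = [0] * n
--     active = 0
--     answer = 0
--     for i, p in enumerate(players):
--         if 0 <= i - k < i:
--             active -= needs[i - k]
--         if p >= m:
--             need = p // m - active
--             if need > 0:
--                 needs[i] = need
--                 answer += need
--                 if k > 0:
--                     active += need
--     return answer
-- ===== Notes on version B (the rewrite author's own statement) =====
-- stated objective: faster
-- what changed: A re-adds the expansion to up to k entries of a servers array at every step (O(n*k)); B keeps a single running count of currently-active servers as a sliding window over the recorded per-step needs, expiring one entry per step, in O(n) total.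
-- outside the precondition, e.g. on solution([5], 0, 1): A raises ZeroDivisionError, B raises ZeroDivisionError
import Mathlib
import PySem

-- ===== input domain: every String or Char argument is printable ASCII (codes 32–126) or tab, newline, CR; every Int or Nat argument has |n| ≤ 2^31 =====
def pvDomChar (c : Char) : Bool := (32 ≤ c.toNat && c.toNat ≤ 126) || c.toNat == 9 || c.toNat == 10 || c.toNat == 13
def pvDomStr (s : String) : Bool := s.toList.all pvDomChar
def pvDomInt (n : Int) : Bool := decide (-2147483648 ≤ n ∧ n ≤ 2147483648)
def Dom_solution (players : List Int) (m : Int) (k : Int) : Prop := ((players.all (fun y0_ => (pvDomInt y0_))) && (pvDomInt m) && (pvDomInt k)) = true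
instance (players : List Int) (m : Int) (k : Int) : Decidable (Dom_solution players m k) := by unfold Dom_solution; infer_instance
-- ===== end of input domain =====

-- B replaces A's O(n·k) per-expansion range update of the servers array by a sliding
-- window count of currently-active servers, maintained incrementally in O(n) total.

-- ===== PORT A =====
-- inner helper: servers[start+idx] += need_server for idx in range(k), bounds-checked
-- (list write ported by hand via List.set; the index start+idx is nonnegative, so toNat is exact)
def serverExpansion (size k need start : Int) (servers : List Int) : List Int :=
  (PySem.List.pyRange 0 k 1).foldl
    (fun sv idx =>
      if start + idx < size then
        sv.set (start + idx).toNat (sv.getD (start + idx).toNat 0 + need)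
      else sv) servers

def solLoopA (size m k : Int) : List Int → Nat → Int → List Int → Int
  | [], _, answer, _ => answer
  | player :: rest, idx, answer, servers =>
    if player ≥ m then
      let need := PySem.Int.floordiv player m - servers.getD idx 0
      if need > 0 then
        solLoopA size m k rest (idx + 1) (answer + need)
          (serverExpansion size k need (idx : Int) servers)
      else solLoopA size m k rest (idx + 1) answer servers
    else solLoopA size m k rest (idx + 1) answer servers

def solution (players : List Int) (m : Int) (k : Int) : Int :=
  solLoopA (players.length : Int) m k players 0 0 (List.replicate players.length 0)

-- ===== PORT B =====
def solLoopB (m k : Int) : List Int → Nat → List Int → Int → Int → Int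
  | [], _, _, _, answer => answer
  | p :: rest, i, needs, active, answer =>
    let active' := if 0 ≤ (i : Int) - k ∧ (i : Int) - k < (i : Int)
                   then active - needs.getD ((i : Int) - k).toNat 0 else active
    if p ≥ m then
      let need := PySem.Int.floordiv p m - active'
      if need > 0 then
        solLoopB m k rest (i + 1) (needs.set i need)
          (if k > 0 then active' + need else active') (answer + need)
      else solLoopB m k rest (i + 1) needs active' answer
    else solLoopB m k rest (i + 1) needs active' answer

def solution_alt (players : List Int) (m : Int) (k : Int) : Int :=
  solLoopB m k players 0 (List.replicate players.length 0) 0 0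

-- ===== PRECONDITION & SPEC =====
-- Pre_ excludes exactly the inputs on which Python A raises ZeroDivisionError:
-- m = 0 together with some player ≥ 0 (then 'player >= m' holds and 'player // 0' raises; B raises there too).
def Pre_solution (players : List Int) (m : Int) (k : Int) : Prop :=
  m ≠ 0 ∨ ∀ p ∈ players, p < 0
instance (players : List Int) (m : Int) (k : Int) : Decidable (Pre_solution players m k) := by
  unfold Pre_solution; infer_instance

def pvWitness_solution : List Int × Int × Int := ([6, 2, 0, 9], 3, 2)

def Spec_solution (players : List Int) (m : Int) (k : Int) (out : Int) : Prop := out = solution_alt players m k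
instance (players : List Int) (m : Int) (k : Int) (out : Int) : Decidable (Spec_solution players m k out) := by unfold Spec_solution; infer_instance

-- ===== CLAIM (what is proved, stated in full; the proofs are below) =====
def Claim_equal_solution : Prop := ∀ (players : List Int) (m : Int) (k : Int), Dom_solution players m k → Pre_solution players m k → Spec_solution players m k (solution players m k)

-- ===== LEMMAS AND PROOFS =====

lemma getD_set_self (xs : List Int) (i : Nat) (v : Int) (h : i < xs.length) :
    (xs.set i v).getD i 0 = v := by
  simp [List.getD, h]

lemma getD_set_ne (xs : List Int) (i t : Nat) (v : Int) (h : t ≠ i) :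
    (xs.set i v).getD t 0 = xs.getD t 0 := by
  simp [List.getD, List.getElem?_set_ne (Ne.symm h)]

lemma expand_foldl_length (l : List Int) (size need : Int) (start : Int) (sv : List Int) :
    (l.foldl (fun sv idx =>
      if start + idx < size then
        sv.set (start + idx).toNat (sv.getD (start + idx).toNat 0 + need)
      else sv) sv).length = sv.length := by
  induction l generalizing sv with
  | nil => rfl
  | cons a l ih =>
      simp only [List.foldl_cons]
      rw [ih]
      split <;> simp

lemma serverExpansion_length (size k need start : Int) (sv : List Int) :
    (serverExpansion size k need start sv).length = sv.length :=
  expand_foldl_length _ _ _ _ _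

lemma expand_aux (c : Nat) (size need : Int) (i j : Nat) :
    ∀ (sv : List Int), (sv.length : Int) = size → j < sv.length →
    ((PySem.List.pyRange 0 (c : Int) 1).foldl (fun sv idx =>
        if (i : Int) + idx < size then
          sv.set ((i : Int) + idx).toNat (sv.getD ((i : Int) + idx).toNat 0 + need)
        else sv) sv).getD j 0
      = sv.getD j 0 + (if i ≤ j ∧ j < i + c then need else 0) := by
  induction c with
  | zero =>
      intro sv hsize hj
      rw [show ((0 : Nat) : Int) = 0 from rfl, PySem.List.pyRange_one_eq_nil le_rfl]
      simp only [List.foldl_nil]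
      rw [if_neg (by omega)]
      ring
  | succ c ih =>
      intro sv hsize hj
      have hsplit : PySem.List.pyRange 0 ((c : Nat) + 1 : Int) 1 =
          PySem.List.pyRange 0 (c : Int) 1 ++ [(c : Int)] :=
        PySem.List.pyRange_one_succ_right (by omega)
      rw [show (((c + 1 : Nat)) : Int) = (c : Int) + 1 by push_cast; ring, hsplit,
        List.foldl_append]
      simp only [List.foldl_cons, List.foldl_nil]
      have hml : ((PySem.List.pyRange 0 (c : Int) 1).foldl (fun sv idx =>
          if (i : Int) + idx < size then
            sv.set ((i : Int) + idx).toNat (sv.getD ((i : Int) + idx).toNat 0 + need)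
          else sv) sv).length = sv.length := expand_foldl_length _ _ _ _ _
      have hmid := ih sv hsize hj
      by_cases hlt : (i : Int) + (c : Int) < size
      · rw [if_pos hlt]
        have htn : ((i : Int) + (c : Int)).toNat = i + c := by omega
        rw [htn]
        by_cases hj2 : j = i + c
        · subst hj2
          rw [getD_set_self _ _ _ (by omega), hmid, if_neg (by omega),
            if_pos (by omega)]
          ring
        · rw [getD_set_ne _ _ _ _ hj2, hmid]
          congr 1
          exact if_congr (by omega) rfl rfl
      · rw [if_neg hlt, hmid]
        congr 1
        exact if_congr (by omega) rfl rfl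

lemma serverExpansion_getD (size k need : Int) (i j : Nat) (sv : List Int)
    (hsize : (sv.length : Int) = size) (hj : j < sv.length) :
    (serverExpansion size k need (i : Int) sv).getD j 0 =
      sv.getD j 0 + (if (i : Int) ≤ (j : Int) ∧ (j : Int) < (i : Int) + k then need else 0) := by
  unfold serverExpansion
  by_cases hk : k ≤ 0
  · rw [PySem.List.pyRange_one_eq_nil (by omega)]
    simp only [List.foldl_nil]
    rw [if_neg (by omega)]
    ring
  · have hkn : ((k.toNat : Nat) : Int) = k := by omega
    rw [← hkn]
    rw [expand_aux k.toNat size need i j sv hsize hj]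
    congr 1
    exact if_congr (by omega) rfl rfl

lemma loop_eq (m k : Int) (n : Nat) :
    ∀ (rest : List Int) (i : Nat) (ans active : Int) (servers needs : List Int),
    i + rest.length = n →
    servers.length = n →
    needs.length = n →
    (∀ t, i ≤ t → needs.getD t 0 = 0) →
    (∀ j, j < n → servers.getD j 0 =
        ∑ t ∈ Finset.range i, if t ≤ j ∧ (j : Int) < (t : Int) + k then needs.getD t 0 else 0) →
    active = (∑ t ∈ Finset.range i, if (i : Int) ≤ (t : Int) + k then needs.getD t 0 else 0) →
    solLoopA (n : Int) m k rest i ans servers = solLoopB m k rest i needs active ans := by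
  intro rest
  induction rest with
  | nil => intro i ans active servers needs _ _ _ _ _ _; rfl
  | cons p rest ih =>
    intro i ans active servers needs hlen hsl hnl hz hs ha
    have hin : i < n := by simp only [List.length_cons] at hlen; omega
    have hread : (if 0 ≤ (i : Int) - k ∧ (i : Int) - k < (i : Int)
        then active - needs.getD ((i : Int) - k).toNat 0 else active) = servers.getD i 0 := by
      rw [hs i hin, ha]
      by_cases hc : 0 ≤ (i : Int) - k ∧ (i : Int) - k < (i : Int)
      · rw [if_pos hc]
        have hr : ((((i : Int) - k).toNat : Nat) : Int) = (i : Int) - k :=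
          Int.toNat_of_nonneg hc.1
        set r := ((i : Int) - k).toNat with hrdef
        have hri : r < i := by omega
        have hsplit : ∀ t ∈ Finset.range i,
            (if (i : Int) ≤ (t : Int) + k then needs.getD t 0 else 0) =
            (if t ≤ i ∧ (i : Int) < (t : Int) + k then needs.getD t 0 else 0) +
            (if t = r then needs.getD t 0 else 0) := by
          intro t ht
          rw [Finset.mem_range] at ht
          by_cases htr : t = r
          · subst htr
            rw [if_pos (by omega), if_neg (by omega), if_pos rfl]
            ring
          · rw [if_neg htr, add_zero]
            exact if_congr (by omega) rfl rfl
        rw [Finset.sum_congr rfl hsplit, Finset.sum_add_distrib,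
          Finset.sum_ite_eq' (Finset.range i) r (fun t => needs.getD t 0),
          if_pos (Finset.mem_range.mpr hri)]
        ring
      · rw [if_neg hc]
        refine Finset.sum_congr rfl ?_
        intro t ht
        rw [Finset.mem_range] at ht
        exact if_congr (by omega) rfl rfl
    simp only [solLoopA, solLoopB]
    rw [hread]
    by_cases hpm : p ≥ m
    · rw [if_pos hpm, if_pos hpm]
      by_cases hnpos : PySem.Int.floordiv p m - servers.getD i 0 > 0
      · rw [if_pos hnpos, if_pos hnpos]
        set need := PySem.Int.floordiv p m - servers.getD i 0 with hneed
        apply ih (i + 1) (ans + need) _ _ _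
        · simp only [List.length_cons] at hlen; omega
        · rw [serverExpansion_length]; exact hsl
        · rw [List.length_set]; exact hnl
        · intro t ht
          rw [getD_set_ne _ _ _ _ (by omega)]
          exact hz t (by omega)
        · intro j hj
          rw [serverExpansion_getD (n : Int) k need i j servers (by rw [hsl]) (by omega),
            hs j hj, Finset.sum_range_succ]
          congr 1
          · refine Finset.sum_congr rfl ?_
            intro t ht
            rw [Finset.mem_range] at ht
            rw [getD_set_ne _ _ _ _ (by omega)]
          · rw [getD_set_self _ _ _ (by omega)]
            exact if_congr (by omega) rfl rfl
        · rw [Finset.sum_range_succ, getD_set_self _ _ _ (by omega)]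
          have hcong : (∑ t ∈ Finset.range i,
              if ((i + 1 : Nat) : Int) ≤ (t : Int) + k then (needs.set i need).getD t 0 else 0)
              = ∑ t ∈ Finset.range i,
              if t ≤ i ∧ (i : Int) < (t : Int) + k then needs.getD t 0 else 0 := by
            refine Finset.sum_congr rfl ?_
            intro t ht
            rw [Finset.mem_range] at ht
            rw [getD_set_ne _ _ _ _ (by omega)]
            exact if_congr (by push_cast; omega) rfl rfl
          rw [hcong, ← hs i hin]
          by_cases hk : k > 0
          · rw [if_pos hk, if_pos (show ((i + 1 : Nat) : Int) ≤ (i : Int) + k by push_cast; omega)]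
          · rw [if_neg hk, if_neg (by push_cast; omega), add_zero]
      · rw [if_neg hnpos, if_neg hnpos]
        apply ih (i + 1) ans _ _ _
        · simp only [List.length_cons] at hlen; omega
        · exact hsl
        · exact hnl
        · intro t ht; exact hz t (by omega)
        · intro j hj
          rw [Finset.sum_range_succ, hz i le_rfl, ite_self, add_zero]
          exact hs j hj
        · rw [Finset.sum_range_succ, hz i le_rfl, ite_self, add_zero, hs i hin]
          refine Finset.sum_congr rfl ?_
          intro t ht
          rw [Finset.mem_range] at ht
          exact if_congr (by push_cast; omega) rfl rfl
    · rw [if_neg hpm, if_neg hpm]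
      apply ih (i + 1) ans _ _ _
      · simp only [List.length_cons] at hlen; omega
      · exact hsl
      · exact hnl
      · intro t ht; exact hz t (by omega)
      · intro j hj
        rw [Finset.sum_range_succ, hz i le_rfl, ite_self, add_zero]
        exact hs j hj
      · rw [Finset.sum_range_succ, hz i le_rfl, ite_self, add_zero, hs i hin]
        refine Finset.sum_congr rfl ?_
        intro t ht
        rw [Finset.mem_range] at ht
        exact if_congr (by push_cast; omega) rfl rfl

-- ===== VERDICT (by name: the statement is the Claim_ definition above) =====
theorem solution_spec : Claim_equal_solution := by
  intro players m k _ _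
  show solution players m k = solution_alt players m k
  unfold solution solution_alt
  refine loop_eq m k players.length players 0 0 0 _ _ (by simp) (by simp) (by simp) ?_ ?_ (by simp)
  · intro t _; simp [List.getD]
  · intro j _; simp [List.getD]
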